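-- pv_equiv track=rewrite | github.com/EgorPlehanov/wfc_and_a_star_algorithm | wave_function_collapse.py | get_all_rotations
-- ===== SOURCE A (Python) =====
-- def get_all_rotations(pixelMatrix):
--     pixelMatrix_rotated_90 = [[pixelMatrix[j][i] for j in range(len(pixelMatrix))] for i in range(len(pixelMatrix[0])-1,-1,-1)]
--     pixelMatrix_rotated_180 = [[pixelMatrix_rotated_90[j][i] for j in range(len(pixelMatrix_rotated_90))] for i in range(len(pixelMatrix_rotated_90[0])-1,-1,-1)]
--     pixelMatrix_rotated_270 = [[pixelMatrix_rotated_180[j][i] for j in range(len(pixelMatrix_rotated_180))] for i in range(len(pixelMatrix_rotated_180[0])-1,-1,-1)]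
--     return tuple(tuple(row) for row in pixelMatrix), \
--             tuple(tuple(row) for row in pixelMatrix_rotated_90), \
--             tuple(tuple(row) for row in pixelMatrix_rotated_180), \
--             tuple(tuple(row) for row in pixelMatrix_rotated_270)
-- ===== SOURCE B (Python) =====
-- def get_all_rotations(pixelMatrix):
--     h, w = len(pixelMatrix), len(pixelMatrix[0])
--     original = tuple(tuple(row) for row in pixelMatrix)
--     rotated_90 = tuple(tuple(pixelMatrix[i][j] for i in range(h)) for j in reversed(range(w)))
--     rotated_180 = tuple(tuple(pixelMatrix[i][j] for j in reversed(range(w))) for i in reversed(range(h)))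
--     rotated_270 = tuple(tuple(pixelMatrix[i][j] for i in reversed(range(h))) for j in range(w))
--     return original, rotated_90, rotated_180, rotated_270
-- ===== Notes on version B (the rewrite author's own statement) =====
-- stated objective: simpler
-- what changed: B computes each of the three rotations directly from the original matrix with one index comprehension each (90: columns right-to-left, 180: both axes reversed, 270: columns with rows reversed), instead of A's chain where each rotation is computed from the previous rotation's result; Pre_ excludes only inputs on which A raises IndexError (empty matrix, empty first row, a row shorter than the first).
import Mathlib
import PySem

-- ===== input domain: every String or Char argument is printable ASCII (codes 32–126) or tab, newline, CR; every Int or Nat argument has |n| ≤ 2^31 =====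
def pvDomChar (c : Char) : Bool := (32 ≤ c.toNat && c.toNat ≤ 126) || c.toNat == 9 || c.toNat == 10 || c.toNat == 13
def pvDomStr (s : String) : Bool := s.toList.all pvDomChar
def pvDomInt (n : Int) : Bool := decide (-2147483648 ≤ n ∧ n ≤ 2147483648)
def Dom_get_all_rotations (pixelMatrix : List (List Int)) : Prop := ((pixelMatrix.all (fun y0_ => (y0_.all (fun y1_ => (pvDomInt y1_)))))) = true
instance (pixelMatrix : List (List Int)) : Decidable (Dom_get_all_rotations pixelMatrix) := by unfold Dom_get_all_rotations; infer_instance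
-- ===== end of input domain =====

-- B computes each of the three rotations directly from the original matrix with one index
-- comprehension each, instead of A's chain where each rotation reads the previous result.

-- ===== PORT A =====
-- one 90° CCW rotation comprehension, as written three times in A (indices valid under Pre_)
def pvRotA (m : List (List Int)) : List (List Int) :=
  (PySem.List.pyRange (((PySem.List.pyGetD m 0 ([] : List Int)).length : Int) - 1) (-1) (-1)).map
    (fun i => (PySem.List.pyRange 0 (m.length : Int) 1).map
      (fun j => PySem.List.pyGetD (PySem.List.pyGetD m j ([] : List Int)) i 0))

def get_all_rotations (pixelMatrix : List (List Int)) : List (List Int) × List (List Int) × List (List Int) × List (List Int) :=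
  let r90 := pvRotA pixelMatrix
  let r180 := pvRotA r90
  let r270 := pvRotA r180
  (pixelMatrix, r90, r180, r270)

-- ===== PORT B =====
def get_all_rotations_alt (pixelMatrix : List (List Int)) : List (List Int) × List (List Int) × List (List Int) × List (List Int) :=
  let h : Int := pixelMatrix.length
  let w : Int := (PySem.List.pyGetD pixelMatrix 0 ([] : List Int)).length
  let r90 := ((PySem.List.pyRange 0 w 1).reverse).map (fun j =>
    (PySem.List.pyRange 0 h 1).map (fun i =>
      PySem.List.pyGetD (PySem.List.pyGetD pixelMatrix i ([] : List Int)) j (0 : Int)))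
  let r180 := ((PySem.List.pyRange 0 h 1).reverse).map (fun i =>
    ((PySem.List.pyRange 0 w 1).reverse).map (fun j =>
      PySem.List.pyGetD (PySem.List.pyGetD pixelMatrix i ([] : List Int)) j (0 : Int)))
  let r270 := (PySem.List.pyRange 0 w 1).map (fun j =>
    ((PySem.List.pyRange 0 h 1).reverse).map (fun i =>
      PySem.List.pyGetD (PySem.List.pyGetD pixelMatrix i ([] : List Int)) j (0 : Int)))
  (pixelMatrix, r90, r180, r270)

-- ===== PRECONDITION & SPEC =====
-- Pre_ excludes exactly the inputs on which A raises IndexError: the empty matrix, a matrix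
-- whose first row is empty, and matrices with a row shorter than the first row.
def Pre_get_all_rotations (pixelMatrix : List (List Int)) : Prop :=
  pixelMatrix ≠ [] ∧ pixelMatrix.headI ≠ [] ∧
    ∀ r ∈ pixelMatrix, pixelMatrix.headI.length ≤ r.length
instance (pixelMatrix : List (List Int)) : Decidable (Pre_get_all_rotations pixelMatrix) := by
  unfold Pre_get_all_rotations; infer_instance
def pvWitness_get_all_rotations : List (List Int) := [[1, 2], [3, 4]]

def Spec_get_all_rotations (pixelMatrix : List (List Int)) (out : List (List Int) × List (List Int) × List (List Int) × List (List Int)) : Prop := out = get_all_rotations_alt pixelMatrix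
instance (pixelMatrix : List (List Int)) (out : List (List Int) × List (List Int) × List (List Int) × List (List Int)) : Decidable (Spec_get_all_rotations pixelMatrix out) := by unfold Spec_get_all_rotations; infer_instance

-- ===== CLAIM =====
def Claim_equal_get_all_rotations : Prop := ∀ (pixelMatrix : List (List Int)), Dom_get_all_rotations pixelMatrix → Pre_get_all_rotations pixelMatrix → Spec_get_all_rotations pixelMatrix (get_all_rotations pixelMatrix)

-- ===== LEMMAS AND PROOFS =====

-- the canonical "list of the first w columns" both ports reduce to
def pvT (w : Nat) (A : List (List Int)) : List (List Int) :=
  (List.range w).map (fun i => A.map (fun r => r.getD i 0))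

theorem pvT_length (w : Nat) (A : List (List Int)) : (pvT w A).length = w := by
  simp [pvT]

theorem pvT_row_len (w : Nat) (A : List (List Int)) :
    ∀ r ∈ pvT w A, r.length = A.length := by
  intro r hr
  simp [pvT] at hr
  obtain ⟨i, _, rfl⟩ := hr
  simp

theorem pvGetD_zero_headI (m : List (List Int)) :
    PySem.List.pyGetD m 0 ([] : List Int) = m.headI := by
  cases m with
  | nil => rfl
  | cons a t => simp [PySem.List.pyGetD_zero_cons]

-- mapping the inner "for <idx> in range(len(m))" comprehension over the rows of m
theorem pvColMap {β : Type} (m : List (List Int)) (f : List Int → β) :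
    (PySem.List.pyRange 0 (m.length : Int) 1).map
      (fun j => f (PySem.List.pyGetD m j ([] : List Int)))
    = m.map f := by
  have h1 : (fun j => f (PySem.List.pyGetD m j ([] : List Int)))
      = f ∘ (fun j => PySem.List.pyGetD m j ([] : List Int)) := rfl
  rw [h1, ← List.map_map, PySem.List.map_pyGetD_pyRange_zero']

-- mapping over an ascending integer range is mapping over List.range
theorem pvMapRange {α : Type} (n : Nat) (F : Int → α) :
    (PySem.List.pyRange 0 (n : Int) 1).map F
    = (List.range n).map (fun (k : Nat) => F (k : Int)) := by
  rw [PySem.List.pyRange_zero_natCast, List.map_map]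
  rfl

theorem pvRotA_eq (m : List (List Int)) :
    pvRotA m = (pvT m.headI.length m).reverse := by
  unfold pvRotA pvT
  have hin : ∀ i : Int,
      (PySem.List.pyRange 0 (m.length : Int) 1).map
        (fun j => PySem.List.pyGetD (PySem.List.pyGetD m j ([] : List Int)) i 0)
      = m.map (fun r => PySem.List.pyGetD r i 0) := fun i =>
    pvColMap m (fun r => PySem.List.pyGetD r i 0)
  have hr : PySem.List.pyRange ((m.headI.length : Int) - 1) (-1) (-1)
      = (PySem.List.pyRange 0 (m.headI.length : Int) 1).reverse := by
    have := PySem.List.pyRange_neg_one_eq_reverse ((m.headI.length : Int) - 1) (-1)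
    simpa using this
  rw [pvGetD_zero_headI, hr, List.map_reverse]
  congr 1
  simp only [hin]
  rw [pvMapRange]
  apply List.map_congr_left
  intro i _
  simp [PySem.List.pyGetD_natCast]

theorem getD_range_self (r : List Int) :
    (List.range r.length).map (fun i => r.getD i 0) = r := by
  induction r with
  | nil => simp
  | cons x xs ih =>
    simp only [List.length_cons, List.range_succ_eq_map, List.map_cons, List.map_map,
      Function.comp_def, Nat.succ_eq_add_one, List.getD_cons_zero, List.getD_cons_succ]
    rw [ih]

theorem getD_range_take (w : Nat) (r : List Int) (h : w ≤ r.length) :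
    (List.range w).map (fun i => r.getD i 0) = r.take w := by
  apply List.ext_getElem
  · simp [h]
  · intro k h1 h2
    have hk : k < w := by simpa using h1
    simp only [List.getElem_map, List.getElem_range, List.getElem_take]
    exact List.getD_eq_getElem r 0 (by omega)

theorem pvT_T (w : Nat) (A : List (List Int)) (hA : ∀ r ∈ A, r.length = w) :
    pvT A.length (pvT w A) = A := by
  apply List.ext_getElem
  · simp [pvT]
  · intro j h1 h2
    simp only [pvT, List.getElem_map, List.getElem_range, List.map_map, Function.comp_def]
    have h2' : j < A.length := by simpa [pvT] using h2
    have hget : ∀ i : Nat, (A.map (fun r => r.getD i 0)).getD j 0 = A[j].getD i 0 := by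
      intro i
      rw [List.getD_eq_getElem?_getD, List.getElem?_map, List.getElem?_eq_getElem h2']
      rfl
    simp only [hget]
    have hj := hA A[j] (List.getElem_mem h2')
    rw [← hj]
    exact getD_range_self A[j]

theorem pvT_reverse (w : Nat) (A : List (List Int)) :
    pvT w A.reverse = (pvT w A).map List.reverse := by
  simp [pvT, List.map_map, Function.comp_def, List.map_reverse]

theorem pvT_map_reverse (w : Nat) (A : List (List Int)) (hA : ∀ r ∈ A, r.length = w) :
    pvT w (A.map List.reverse) = (pvT w A).reverse := by
  apply List.ext_getElem
  · simp [pvT]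
  · intro k h1 h2
    have hk : k < w := by simpa [pvT] using h1
    rw [List.getElem_reverse]
    simp only [pvT, List.getElem_map, List.getElem_range, List.length_map, List.length_range,
      List.map_map, Function.comp_def]
    apply List.map_congr_left
    intro r hr
    have hl := hA r hr
    have hk' : k < r.length := by omega
    have e1 : r.reverse.getD k 0 = r[r.length - 1 - k] := by
      rw [List.getD_eq_getElem r.reverse 0 (by simpa using hk'), List.getElem_reverse]
    have e2 : r.getD (w - 1 - k) 0 = r[w - 1 - k] := List.getD_eq_getElem r 0 (by omega)
    rw [e1, e2]
    congr 1
    omega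

theorem headI_mem_of_ne_nil {α : Type} [Inhabited α] (l : List α) (h : l ≠ []) :
    l.headI ∈ l := by
  cases l with
  | nil => exact absurd rfl h
  | cons a t => exact List.mem_cons_self ..

-- reading only the first w entries of each row, pvT does not see a truncation to width w
theorem pvT_take (w : Nat) (A : List (List Int)) :
    pvT w (A.map (·.take w)) = pvT w A := by
  apply List.ext_getElem
  · simp [pvT]
  · intro k h1 h2
    have hk : k < w := by simpa [pvT] using h1
    simp only [pvT, List.getElem_map, List.getElem_range, List.map_map, Function.comp_def]
    apply List.map_congr_left
    intro r _
    rw [List.getD_eq_getElem?_getD, List.getD_eq_getElem?_getD, List.getElem?_take]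
    simp [hk]

-- the inner "for j in reversed(range(w))" comprehension of B's 180° rotation on one row
theorem pvRow180 (w : Nat) (r : List Int) (h : w ≤ r.length) :
    ((PySem.List.pyRange 0 (w : Int) 1).reverse).map
      (fun j => PySem.List.pyGetD r j (0 : Int)) = (r.take w).reverse := by
  rw [List.map_reverse]
  congr 1
  rw [pvMapRange]
  rw [show (fun (k : Nat) => PySem.List.pyGetD r (k : Int) 0) = fun k => r.getD k 0 by
    funext k; simp [PySem.List.pyGetD_natCast]]
  exact getD_range_take w r h

-- ===== VERDICT =====
theorem get_all_rotations_spec : Claim_equal_get_all_rotations := by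
  intro m _ hPre
  obtain ⟨hne, hh, hlen⟩ := hPre
  unfold Spec_get_all_rotations
  have hw0 : 0 < m.headI.length := List.length_pos_iff.mpr hh
  set w := m.headI.length with hw
  -- the width-w truncation, the common rectangular matrix both sides rotate
  set grid := m.map (·.take w) with hgrid
  have hgne : grid ≠ [] := by simpa [hgrid] using hne
  have hglen : ∀ r ∈ grid, r.length = w := by
    intro r hr
    rw [hgrid, List.mem_map] at hr
    obtain ⟨s, hs, rfl⟩ := hr
    simp [List.length_take, Nat.min_eq_left (hlen s hs)]
  -- ===== A's side: the chain of three pvRotA =====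
  have h90 : pvRotA m = (pvT w grid).reverse := by
    rw [pvRotA_eq, hgrid, pvT_take]
  have h90len : ∀ r ∈ (pvT w grid).reverse, r.length = grid.length := by
    intro r hr
    exact pvT_row_len _ _ r (List.mem_reverse.mp hr)
  have h90ne : (pvT w grid).reverse ≠ [] := by
    apply List.ne_nil_of_length_pos
    simpa [pvT_length] using hw0
  have h90h : ((pvT w grid).reverse).headI.length = grid.length :=
    h90len _ (headI_mem_of_ne_nil _ h90ne)
  have h180 : pvRotA ((pvT w grid).reverse) = (grid.map List.reverse).reverse := by
    rw [pvRotA_eq, h90h, pvT_reverse, pvT_T w grid hglen]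
  have h180len : ∀ r ∈ (grid.map List.reverse).reverse, r.length = w := by
    intro r hr
    rw [List.mem_reverse, List.mem_map] at hr
    obtain ⟨s, hs, rfl⟩ := hr
    simpa using hglen s hs
  have h180ne : (grid.map List.reverse).reverse ≠ [] := by simpa using hgne
  have h180h : ((grid.map List.reverse).reverse).headI.length = w :=
    h180len _ (headI_mem_of_ne_nil _ h180ne)
  have h270 : pvRotA ((grid.map List.reverse).reverse) = (pvT w grid).map List.reverse := by
    rw [pvRotA_eq, h180h, pvT_reverse, pvT_map_reverse w grid hglen]
    simp [List.map_reverse]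
  -- ===== B's side: the three direct comprehensions =====
  have hb90 : ((PySem.List.pyRange 0 ((PySem.List.pyGetD m 0 ([] : List Int)).length : Int) 1).reverse).map
      (fun j => (PySem.List.pyRange 0 (m.length : Int) 1).map (fun i =>
        PySem.List.pyGetD (PySem.List.pyGetD m i ([] : List Int)) j (0 : Int)))
      = (pvT w grid).reverse := by
    rw [pvGetD_zero_headI, ← hw, hgrid, pvT_take, List.map_reverse]
    congr 1
    rw [pvMapRange]
    unfold pvT
    apply List.map_congr_left
    intro k _
    rw [pvColMap m (fun r => PySem.List.pyGetD r (k : Int) 0)]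
    apply List.map_congr_left
    intro r _
    simp [PySem.List.pyGetD_natCast]
  have hb180 : ((PySem.List.pyRange 0 (m.length : Int) 1).reverse).map
      (fun i => ((PySem.List.pyRange 0 ((PySem.List.pyGetD m 0 ([] : List Int)).length : Int) 1).reverse).map
        (fun j => PySem.List.pyGetD (PySem.List.pyGetD m i ([] : List Int)) j (0 : Int)))
      = (grid.map List.reverse).reverse := by
    rw [pvGetD_zero_headI, ← hw, List.map_reverse]
    congr 1
    rw [pvColMap m (fun r => ((PySem.List.pyRange 0 (w : Int) 1).reverse).map
      (fun j => PySem.List.pyGetD r j (0 : Int)))]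
    rw [hgrid, List.map_map]
    apply List.map_congr_left
    intro r hr
    simp only [Function.comp_def]
    exact pvRow180 w r (hlen r hr)
  have hb270 : (PySem.List.pyRange 0 ((PySem.List.pyGetD m 0 ([] : List Int)).length : Int) 1).map
      (fun j => ((PySem.List.pyRange 0 (m.length : Int) 1).reverse).map
        (fun i => PySem.List.pyGetD (PySem.List.pyGetD m i ([] : List Int)) j (0 : Int)))
      = (pvT w grid).map List.reverse := by
    rw [pvGetD_zero_headI, ← hw, hgrid, pvT_take, pvMapRange]
    unfold pvT
    rw [List.map_map]
    apply List.map_congr_left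
    intro k _
    simp only [Function.comp_def]
    rw [List.map_reverse]
    congr 1
    rw [pvColMap m (fun r => PySem.List.pyGetD r (k : Int) 0)]
    apply List.map_congr_left
    intro r _
    simp [PySem.List.pyGetD_natCast]
  unfold get_all_rotations get_all_rotations_alt
  dsimp only
  rw [h90, h180, h270, hb90, hb180, hb270]
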